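-- pv_equiv track=rewrite | github.com/aryanputta/QEdge6G | src/optimization/qubo_builder.py | _exact_binary_weights
-- ===== SOURCE A (Python) =====
-- def _exact_binary_weights(capacity: int) -> list[int]:
--     if capacity <= 0:
--         return []
--     weights = []
--     remaining = capacity
--     bit = 1
--     while remaining > 0:
--         weight = min(bit, remaining)
--         weights.append(weight)
--         remaining -= weight
--         bit *= 2
--     return weights
-- ===== SOURCE B (Python) =====
-- def _exact_binary_weights(capacity: int) -> list[int]:
--     if capacity <= 0:
--         return []
--     m = (capacity + 1).bit_length() - 1
--     weights = [1 << i for i in range(m)]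
--     remainder = capacity - ((1 << m) - 1)
--     if remainder > 0:
--         weights.append(remainder)
--     return weights
-- ===== Notes on version B (the rewrite author's own statement) =====
-- stated objective: idiomatic
-- what changed: Replaces the accumulate-and-decrement while loop with a closed-form bit count: m = (capacity+1).bit_length()-1 gives the number of full power-of-two weights, built by a comprehension, with the remainder appended once if positive.
import Mathlib
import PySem

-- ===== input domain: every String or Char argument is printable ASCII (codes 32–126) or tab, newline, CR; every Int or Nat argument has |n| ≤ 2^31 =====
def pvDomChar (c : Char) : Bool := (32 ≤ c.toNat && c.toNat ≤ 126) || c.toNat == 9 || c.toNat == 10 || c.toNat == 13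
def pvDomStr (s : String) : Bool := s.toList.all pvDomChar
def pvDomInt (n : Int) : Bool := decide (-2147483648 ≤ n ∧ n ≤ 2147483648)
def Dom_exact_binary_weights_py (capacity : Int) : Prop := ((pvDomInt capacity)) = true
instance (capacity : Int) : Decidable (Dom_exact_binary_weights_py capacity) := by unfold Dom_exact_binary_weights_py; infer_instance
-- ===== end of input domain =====

-- B replaces A's accumulate-and-decrement loop by a closed-form bit-length count plus one conditional append (idiomatic; same O(log n) cost).

-- ===== PORT A =====
-- the while loop of A; fuel bounds the iteration count (each real iteration removes ≥ 1 from remaining, so remaining.toNat fuel is enough)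
def ebwLoop : Nat → Int → Int → List Int
  | 0, _, _ => []
  | fuel + 1, remaining, bit =>
    if remaining > 0 then
      let weight := min bit remaining
      weight :: ebwLoop fuel (remaining - weight) (bit * 2)
    else []

def exact_binary_weights_py (capacity : Int) : List Int :=
  if capacity ≤ 0 then []
  else ebwLoop capacity.toNat capacity 1

-- ===== PORT B =====
-- Python int.bit_length, exact for n ≥ 0 (the only arguments B passes it)
def pyBitLength (n : Nat) : Nat := if n = 0 then 0 else Nat.log2 n + 1

def exact_binary_weights_py_alt (capacity : Int) : List Int :=
  if capacity ≤ 0 then []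
  else
    let m := pyBitLength (capacity + 1).toNat - 1
    let weights := (List.range m).map (fun i => ((2 : Int) ^ i))  -- 1 << i
    let remainder := capacity - ((2 : Int) ^ m - 1)
    if remainder > 0 then weights ++ [remainder] else weights

-- ===== PRECONDITION & SPEC =====
def Spec_exact_binary_weights_py (capacity : Int) (out : List Int) : Prop := out = exact_binary_weights_py_alt capacity
instance (capacity : Int) (out : List Int) : Decidable (Spec_exact_binary_weights_py capacity out) := by unfold Spec_exact_binary_weights_py; infer_instance

-- ===== CLAIM (what is proved, stated in full; the proofs are below) =====
def Claim_equal_exact_binary_weights_py : Prop := ∀ (capacity : Int), Dom_exact_binary_weights_py capacity → Spec_exact_binary_weights_py capacity (exact_binary_weights_py capacity)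

-- ===== LEMMAS AND PROOFS =====

-- Loop characterisation: starting from bit b > 0 and 0 ≤ r with b*(2^j-1) ≤ r < b*(2^(j+1)-1),
-- the loop emits the j full weights b,2b,…,b*2^(j-1) and then the positive remainder, if any.
theorem ebwLoop_eq (j : Nat) : ∀ (b r : Int) (fuel : Nat), 0 < b → 0 ≤ r →
    b * (2 ^ j - 1) ≤ r → r < b * (2 ^ (j + 1) - 1) → r.toNat ≤ fuel →
    ebwLoop fuel r b =
      (List.range j).map (fun i => b * 2 ^ i) ++
        (if r - b * (2 ^ j - 1) > 0 then [r - b * (2 ^ j - 1)] else []) := by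
  induction j with
  | zero =>
    intro b r fuel hb hr _ hub hfuel
    have h2 : (2 : Int) ^ (0 + 1) - 1 = 1 := by norm_num
    rw [h2, mul_one] at hub
    have h0 : r - b * (2 ^ 0 - 1) = r := by ring
    rw [List.range_zero, List.map_nil, List.nil_append, h0]
    rcases eq_or_lt_of_le hr with h0' | hpos
    · rw [← h0']; cases fuel <;> simp [ebwLoop]
    · obtain ⟨f, rfl⟩ : ∃ f, fuel = f + 1 := ⟨fuel - 1, by omega⟩
      have hmin : min b r = r := min_eq_right hub.le
      simp [ebwLoop, hpos, hmin]
      cases f <;> simp [ebwLoop]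
  | succ j ih =>
    intro b r fuel hb hr hlb hub hfuel
    have h2j : (1 : Int) ≤ 2 ^ (j + 1) - 1 := by
      have : (2 : Int) ≤ 2 ^ (j + 1) := by
        calc (2 : Int) = 2 ^ 1 := (pow_one 2).symm
        _ ≤ 2 ^ (j + 1) := pow_le_pow_right₀ (by norm_num) (by omega)
      linarith
    have hbr : b ≤ r := le_trans (by nlinarith) hlb
    have hpos : 0 < r := lt_of_lt_of_le hb hbr
    have h1 : 1 ≤ r.toNat := by omega
    obtain ⟨f, rfl⟩ : ∃ f, fuel = f + 1 := ⟨fuel - 1, by omega⟩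
    have hmin : min b r = b := min_eq_left hbr
    simp only [ebwLoop, hpos, if_pos, hmin]
    have hrec := ih (b * 2) (r - b) f (by positivity) (by linarith)
      (by ring_nf; ring_nf at hlb; linarith)
      (by ring_nf; ring_nf at hub; linarith)
      (by omega)
    rw [hrec]
    have hmap : (List.range j).map (fun i => b * 2 * 2 ^ i)
        = (List.range j).map (fun i => b * 2 ^ (i + 1)) := by
      apply List.map_congr_left; intro i _; ring
    have hrem : r - b - b * 2 * (2 ^ j - 1) = r - b * (2 ^ (j + 1) - 1) := by ring
    rw [hmap, hrem, List.range_succ_eq_map]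
    simp [List.map_map, Function.comp]

theorem exact_binary_weights_eq (capacity : Int) :
    exact_binary_weights_py capacity = exact_binary_weights_py_alt capacity := by
  by_cases hle : capacity ≤ 0
  · simp [exact_binary_weights_py, exact_binary_weights_py_alt, hle]
  · replace hle := lt_of_not_ge hle
    have hc1 : (1 : Int) ≤ capacity := hle
    have hn : (capacity + 1).toNat ≠ 0 := by omega
    set n := (capacity + 1).toNat with hndef
    set m := Nat.log2 n with hmdef
    have hmeq : pyBitLength n - 1 = m := by simp [pyBitLength, hn, hmdef]
    have hlow : 2 ^ m ≤ n := Nat.log2_self_le hn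
    have hhigh : n < 2 ^ (m + 1) := Nat.lt_log2_self
    have hcast : (n : Int) = capacity + 1 := by omega
    have hlowI : (2 : Int) ^ m ≤ capacity + 1 := by
      calc (2 : Int) ^ m = ((2 ^ m : Nat) : Int) := by push_cast; ring
      _ ≤ (n : Int) := by exact_mod_cast hlow
      _ = capacity + 1 := hcast
    have hhighI : capacity + 1 < (2 : Int) ^ (m + 1) := by
      calc capacity + 1 = (n : Int) := hcast.symm
      _ < ((2 ^ (m + 1) : Nat) : Int) := by exact_mod_cast hhigh
      _ = (2 : Int) ^ (m + 1) := by push_cast; ring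
    have hloop := ebwLoop_eq m 1 capacity capacity.toNat (by norm_num) (by linarith)
      (by linarith) (by linarith) (le_refl _)
    simp only [exact_binary_weights_py, exact_binary_weights_py_alt, if_neg (by omega : ¬ capacity ≤ 0)]
    rw [hloop]
    simp only [← hndef, hmeq, one_mul]
    split_ifs <;> simp

-- ===== VERDICT (by name: the statement is the Claim_ definition above) =====
theorem exact_binary_weights_py_spec : Claim_equal_exact_binary_weights_py := by
  intro capacity _
  exact exact_binary_weights_eq capacity
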